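-- pv_equiv track=rewrite | github.com/Dovintc32/JFA-graphic-language | src/Function/process_newlines.py | process_newlines
-- ===== SOURCE A (Python) =====
-- def process_newlines(jfa_code):
--     result = ""
--     newline_count = 0
--     for char in jfa_code:
--         if char == '\n':
--             newline_count += 1
--         else:
--             if newline_count > 0:
--                 result += '\n'
--                 for i in range(newline_count - 1):
--                     result += "/n_Line;\n"
--                 newline_count = 0
--             result += char
--     if newline_count > 0:
--         result += '\n'
--         for i in range(newline_count - 1):
--             result += "None_Line;\n"
--     return result
-- ===== SOURCE B (Python) =====
-- def process_newlines(jfa_code):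
--     out = []
--     i = 0
--     n = len(jfa_code)
--     while i < n:
--         ch = jfa_code[i]
--         if ch != '\n':
--             out.append(ch)
--             i += 1
--         else:
--             j = i + 1
--             while j < n and jfa_code[j] == '\n':
--                 j += 1
--             token = "None_Line;\n" if j == n else "/n_Line;\n"
--             out.append('\n' + token * (j - i - 1))
--             i = j
--     return ''.join(out)
-- ===== Notes on version B (the rewrite author's own statement) =====
-- stated objective: alternative
-- what changed: B scans maximal newline runs with an inner while loop (two-pointer run grouping) and emits each run's newline plus the repeated token in one step into a list joined at the end, instead of A's per-character loop with a newline counter, deferred flush logic and string concatenation.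
import Mathlib
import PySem

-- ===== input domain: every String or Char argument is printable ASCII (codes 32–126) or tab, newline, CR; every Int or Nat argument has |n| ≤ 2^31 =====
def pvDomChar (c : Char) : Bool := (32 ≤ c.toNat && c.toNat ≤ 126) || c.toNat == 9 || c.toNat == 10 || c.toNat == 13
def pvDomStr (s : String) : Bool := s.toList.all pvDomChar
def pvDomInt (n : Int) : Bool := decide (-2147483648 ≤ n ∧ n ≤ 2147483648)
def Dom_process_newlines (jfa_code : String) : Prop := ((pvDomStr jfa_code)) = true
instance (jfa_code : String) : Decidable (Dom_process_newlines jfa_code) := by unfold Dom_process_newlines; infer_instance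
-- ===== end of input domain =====

-- B replaces A's per-character loop with a newline counter and deferred flushes by a
-- two-pointer scan over maximal newline runs, emitting each run's output in one step
-- (objective: alternative decomposition, same O(n) cost).

-- ===== PORT A =====
-- result += '\n' then "<tok>" repeated via 'for i in range(count - 1)' (only when count > 0)
def pnFlush (tok : List Char) (st : List Char × Int) : List Char :=
  if st.2 > 0 then
    (PySem.List.pyRange 0 (st.2 - 1) 1).foldl (fun r _ => r ++ tok) (st.1 ++ ['\n'])
  else st.1

-- one iteration of A's 'for char in jfa_code' loop over state (result, newline_count)
def pnStepA (st : List Char × Int) (c : Char) : List Char × Int :=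
  if c = '\n' then (st.1, st.2 + 1)
  else (pnFlush "/n_Line;\n".toList st ++ [c], 0)

def process_newlines (jfa_code : String) : String :=
  String.ofList (pnFlush "None_Line;\n".toList (jfa_code.toList.foldl pnStepA ([], 0)))

-- ===== PORT B =====
-- token * (j - i - 1)
def pnAltRep (tok : List Char) : Nat → List Char
  | 0 => []
  | n + 1 => tok ++ pnAltRep tok n

-- B's outer while loop: consume one non-newline char, or one whole maximal newline run
def pnAltGo (acc : List Char) : List Char → List Char
  | [] => acc
  | c :: rest =>
    if c ≠ '\n' then pnAltGo (acc ++ [c]) rest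
    else
      -- inner while: j runs to the end of the newline run (run = the newlines after c)
      let run := rest.takeWhile (· == '\n')
      let rest' := rest.dropWhile (· == '\n')
      let token := if rest' = [] then "None_Line;\n".toList else "/n_Line;\n".toList
      pnAltGo (acc ++ '\n' :: pnAltRep token run.length) rest'
termination_by l => l.length
decreasing_by
  · simp
  · simpa using Nat.lt_succ_of_le (List.length_dropWhile_le _ _)

def process_newlines_alt (jfa_code : String) : String :=
  String.ofList (pnAltGo [] jfa_code.toList)

-- ===== PRECONDITION & SPEC =====
def Spec_process_newlines (jfa_code : String) (out : String) : Prop := out = process_newlines_alt jfa_code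
instance (jfa_code : String) (out : String) : Decidable (Spec_process_newlines jfa_code out) := by unfold Spec_process_newlines; infer_instance

-- ===== CLAIM (what is proved, stated in full; the proofs are below) =====
def Claim_equal_process_newlines : Prop := ∀ (jfa_code : String), Dom_process_newlines jfa_code → Spec_process_newlines jfa_code (process_newlines jfa_code)

-- ===== LEMMAS AND PROOFS =====

theorem pnAltRep_succ_right (tok : List Char) (n : Nat) :
    pnAltRep tok (n + 1) = pnAltRep tok n ++ tok := by
  induction n with
  | zero => simp [pnAltRep]
  | succ n ih =>
      calc pnAltRep tok (n + 1 + 1) = tok ++ pnAltRep tok (n + 1) := rfl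
        _ = tok ++ (pnAltRep tok n ++ tok) := by rw [ih]
        _ = (tok ++ pnAltRep tok n) ++ tok := by simp
        _ = pnAltRep tok (n + 1) ++ tok := rfl

theorem pnFoldRange (tok : List Char) (m : Nat) (res : List Char) :
    (PySem.List.pyRange 0 (m : Int) 1).foldl (fun r _ => r ++ tok) res
      = res ++ pnAltRep tok m := by
  induction m with
  | zero => simp [PySem.List.pyRange, pnAltRep]
  | succ m ih =>
      rw [show ((m + 1 : Nat) : Int) = (m : Int) + 1 by push_cast; ring,
        PySem.List.pyRange_one_succ_right (by positivity), List.foldl_append, ih,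
        pnAltRep_succ_right]
      simp

theorem pnFlush_pos (tok res : List Char) (k : Int) (hk : 0 < k) :
    pnFlush tok (res, k) = res ++ '\n' :: pnAltRep tok (k - 1).toNat := by
  have h : (k - 1) = (((k - 1).toNat : Nat) : Int) := by omega
  rw [pnFlush, if_pos hk]
  rw [h, pnFoldRange]
  simp

-- folding A's step through a run of newlines just raises the counter
theorem pnFold_run (r : List Char) (hr : ∀ c ∈ r, c = '\n') (res : List Char) (k : Int)
    (l : List Char) :
    (r ++ l).foldl pnStepA (res, k) = l.foldl pnStepA (res, k + r.length) := by
  induction r generalizing k with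
  | nil => simp
  | cons c r ih =>
      have hc : c = '\n' := hr c (by simp)
      simp only [List.cons_append, List.foldl_cons, pnStepA, if_pos hc]
      rw [ih (fun d hd => hr d (by simp [hd]))]
      congr 2
      simp only [List.length_cons]
      push_cast
      ring

-- head of dropWhile fails the predicate (specific form used below)
theorem pnDropWhile_head {α : Type} (p : α → Bool) (l l2 : List α) (d : α)
    (h : List.dropWhile p l = d :: l2) : p d = false := by
  induction l with
  | nil => simp at h
  | cons x xs ih =>
      rw [List.dropWhile_cons] at h
      split at h
      · exact ih h
      · rename_i hx
        cases h
        simpa using hx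

-- the main invariant: A's loop plus final flush from a flushed state equals B's run scan
theorem pnMain (acc l : List Char) :
    pnFlush "None_Line;\n".toList (l.foldl pnStepA (acc, 0)) = pnAltGo acc l := by
  induction acc, l using pnAltGo.induct with
  | case1 acc => simp [pnFlush, pnAltGo]
  | case2 acc c rest hc ih =>
      rw [pnAltGo]
      simp only [ne_eq, hc, not_false_eq_true, if_true]
      rw [← ih]
      simp only [List.foldl_cons, pnStepA, if_neg hc, pnFlush]
      norm_num
  | case3 acc c rest hc run rest' token ih =>
      have hc' : c = '\n' := by simpa using hc
      have hsplit : rest = run ++ rest' :=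
        (List.takeWhile_append_dropWhile (p := (· == '\n')) (l := rest)).symm
      have hrun : ∀ d ∈ run, d = '\n' := by
        intro d hd
        simpa using List.mem_takeWhile_imp hd
      have htok : token = if rest' = [] then "None_Line;\n".toList else "/n_Line;\n".toList :=
        rfl
      have hhead : ∀ d l'', rest' = d :: l'' → ¬ d = '\n' := by
        intro d l'' h
        have hr' : rest.dropWhile (· == '\n') = d :: l'' := h
        simpa using pnDropWhile_head _ _ _ _ hr'
      have hgo : pnAltGo acc (c :: rest)
          = pnAltGo (acc ++ '\n' :: pnAltRep token run.length) rest' := by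
        rw [pnAltGo, if_neg (by simpa using hc')]
        rfl
      rw [hgo, hc']
      clear_value run rest' token
      conv_lhs => rw [hsplit, show '\n' :: (run ++ rest') = ('\n' :: run) ++ rest' from rfl,
        pnFold_run ('\n' :: run) (by
          intro d hd
          rcases List.mem_cons.mp hd with h | h
          · exact h
          · exact hrun d h)]
      have hlen : (0 : Int) + (('\n' :: run).length : Int) = (run.length : Int) + 1 := by
        simp only [List.length_cons]
        push_cast
        ring
      rw [hlen]
      have hnat : ((run.length : Int) + 1 - 1).toNat = run.length := by omega
      cases hrest' : rest' with
      | nil =>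
          subst hrest'
          have htok' : token = "None_Line;\n".toList := by simpa using htok
          subst htok'
          simp only [List.foldl_nil]
          rw [pnFlush_pos _ _ _ (by positivity), hnat, pnAltGo]
      | cons d l'' =>
          subst hrest'
          have hdne : ¬ d = '\n' := hhead d l'' rfl
          have htok' : token = "/n_Line;\n".toList := by simpa using htok
          subst htok'
          simp only [List.foldl_cons, pnStepA, if_neg hdne]
          rw [pnFlush_pos "/n_Line;\n".toList acc ((run.length : Int) + 1) (by positivity),
            hnat, ← ih]
          simp only [List.foldl_cons, pnStepA, if_neg hdne]
          rw [show pnFlush "/n_Line;\n".toList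
              (acc ++ '\n' :: pnAltRep "/n_Line;\n".toList run.length, 0)
            = acc ++ '\n' :: pnAltRep "/n_Line;\n".toList run.length from rfl]

-- ===== VERDICT (by name: the statement is the Claim_ definition above) =====
theorem process_newlines_spec : Claim_equal_process_newlines := by
  intro jfa_code _
  unfold Spec_process_newlines process_newlines process_newlines_alt
  rw [pnMain]
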